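-- pv_equiv track=rewrite | github.com/Aditya-1020/AdiSystolic | tb/systolic_array/gen_systolic_array.py | stagger
-- ===== SOURCE A (Python) =====
-- def stagger(M, direction, N, DW):
--     """
--     Returns flat list of values to write, one per line.
--     Total lines = (2*N-1) * N  (cycle-major, then col within cycle)
--     direction='row': A matrix — row r starts at cycle r
--     direction='col': B matrix — col c starts at cycle c
--     """
--     total_cycles = 2 * N - 1
--     result = [[0] * N for _ in range(total_cycles)]
--     if direction == 'row':
--         for r in range(N):
--             for k in range(N):
--                 result[r + k][r] = M[r][k]
--     else:
--         for c in range(N):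
--             for k in range(N):
--                 result[c + k][c] = M[k][c]
--     # Flatten: one value per line
--     flat = []
--     for cycle in result:
--         for val in cycle:
--             flat.append(val)
--     return flat
-- ===== SOURCE B (Python) =====
-- def stagger(M, direction, N, DW):
--     # Gather pass: compute each output line directly, no 2D staging buffer.
--     flat = []
--     for cycle in range(2 * N - 1):
--         for col in range(N):
--             k = cycle - col
--             if direction == 'row':
--                 flat.append(M[col][k] if 0 <= k < N else 0)
--             else:
--                 flat.append(M[k][col] if 0 <= k < N else 0)
--     return flat
-- ===== Notes on version B (the rewrite author's own statement) =====
-- stated objective: alternative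
-- what changed: Replaces A's scatter-into-a-(2N-1)xN-grid-then-flatten with a single gather pass that computes each flattened position's value directly via a bounds check, maintaining no 2D buffer.
import Mathlib
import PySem

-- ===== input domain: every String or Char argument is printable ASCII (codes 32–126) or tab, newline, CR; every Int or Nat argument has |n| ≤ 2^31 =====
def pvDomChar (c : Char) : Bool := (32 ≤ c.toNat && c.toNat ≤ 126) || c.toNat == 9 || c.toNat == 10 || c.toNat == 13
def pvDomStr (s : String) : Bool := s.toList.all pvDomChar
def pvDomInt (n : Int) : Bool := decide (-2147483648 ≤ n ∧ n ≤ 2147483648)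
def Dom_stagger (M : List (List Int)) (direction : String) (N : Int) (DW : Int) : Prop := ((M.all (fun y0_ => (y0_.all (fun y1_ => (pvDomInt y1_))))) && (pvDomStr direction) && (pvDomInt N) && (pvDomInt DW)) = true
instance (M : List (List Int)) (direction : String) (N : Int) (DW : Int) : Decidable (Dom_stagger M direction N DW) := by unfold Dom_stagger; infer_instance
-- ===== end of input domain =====

-- B replaces A's scatter-into-a-grid-then-flatten by a direct gather pass (no 2D staging buffer); same cost class.

-- ===== PORT A =====
def stagger (M : List (List Int)) (direction : String) (N : Int) (DW : Int) : List Int :=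
  let totalCycles := 2 * N - 1
  let result0 : List (List Int) :=
    (PySem.List.pyRange 0 totalCycles 1).map (fun _ => PySem.List.pyRepeat [(0 : Int)] N)
  let result : List (List Int) :=
    if direction == "row" then
      (PySem.List.pyRange 0 N 1).foldl (fun g r =>
        (PySem.List.pyRange 0 N 1).foldl (fun g k =>
          g.modify (r + k).toNat
            (fun row => row.set r.toNat (PySem.List.pyGetD (PySem.List.pyGetD M r []) k 0))) g)
        result0
    else
      (PySem.List.pyRange 0 N 1).foldl (fun g c =>
        (PySem.List.pyRange 0 N 1).foldl (fun g k =>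
          g.modify (c + k).toNat
            (fun row => row.set c.toNat (PySem.List.pyGetD (PySem.List.pyGetD M k []) c 0))) g)
        result0
  result.foldl (fun flat cycle => cycle.foldl (fun flat v => flat ++ [v]) flat) []

-- ===== PORT B =====
def stagger_alt (M : List (List Int)) (direction : String) (N : Int) (DW : Int) : List Int :=
  (PySem.List.pyRange 0 (2 * N - 1) 1).foldl (fun flat cycle =>
    (PySem.List.pyRange 0 N 1).foldl (fun flat col =>
      let k := cycle - col
      let v : Int :=
        if direction == "row" then
          if 0 ≤ k ∧ k < N then PySem.List.pyGetD (PySem.List.pyGetD M col []) k 0 else 0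
        else
          if 0 ≤ k ∧ k < N then PySem.List.pyGetD (PySem.List.pyGetD M k []) col 0 else 0
      flat ++ [v]) flat) []

-- ===== PRECONDITION & SPEC =====
-- Pre_ excludes exactly the inputs where Python A raises IndexError: N > 0 but M has
-- fewer than N rows, or one of its first N rows has fewer than N entries.
def Pre_stagger (M : List (List Int)) (direction : String) (N : Int) (DW : Int) : Prop :=
  0 < N → (N ≤ (M.length : Int) ∧ ∀ row ∈ M.take N.toNat, N ≤ (row.length : Int))
instance (M : List (List Int)) (direction : String) (N : Int) (DW : Int) : Decidable (Pre_stagger M direction N DW) := by unfold Pre_stagger; infer_instance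
def pvWitness_stagger : List (List Int) × String × Int × Int := ([[1, 2], [3, 4]], "row", 2, 8)

def Spec_stagger (M : List (List Int)) (direction : String) (N : Int) (DW : Int) (out : List Int) : Prop := out = stagger_alt M direction N DW
instance (M : List (List Int)) (direction : String) (N : Int) (DW : Int) (out : List Int) : Decidable (Spec_stagger M direction N DW out) := by unfold Spec_stagger; infer_instance

-- ===== CLAIM (what is proved, stated in full; the proofs are below) =====
def Claim_equal_stagger : Prop := ∀ (M : List (List Int)) (direction : String) (N : Int) (DW : Int), Dom_stagger M direction N DW → Pre_stagger M direction N DW → Spec_stagger M direction N DW (stagger M direction N DW)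

-- ===== LEMMAS AND PROOFS =====

/-- A `(T × n)` grid of ints presented as a list of rows, described by a function on indices. -/
def pvGrid (T n : Nat) (F : Nat → Nat → Int) : List (List Int) :=
  (List.range T).map (fun c => (List.range n).map (fun col => F c col))

/-- Point update of a grid-describing function. -/
def pvUpd (F : Nat → Nat → Int) (a b : Nat) (v : Int) : Nat → Nat → Int :=
  fun c col => if c = a ∧ col = b then v else F c col

theorem pvUpd_apply (F : Nat → Nat → Int) (a b : Nat) (v : Int) (c col : Nat) :
    pvUpd F a b v c col = if c = a ∧ col = b then v else F c col := rfl

theorem pvGrid_modify_set (T n a b : Nat) (v : Int) (F : Nat → Nat → Int)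
    (ha : a < T) (hb : b < n) :
    (pvGrid T n F).modify a (fun row => row.set b v) = pvGrid T n (pvUpd F a b v) := by
  apply List.ext_getElem
  · simp [pvGrid]
  · intro i h1 h2
    simp only [pvGrid, List.length_map, List.length_range, List.length_modify] at h1 h2 ⊢
    rw [List.getElem_modify]
    by_cases hia : a = i
    · subst hia
      rw [if_pos rfl]
      apply List.ext_getElem
      · simp
      · intro j hj1 hj2
        simp only [List.length_map, List.length_range, List.length_set] at hj1 hj2
        simp only [List.getElem_map, List.getElem_range]
        rw [List.getElem_set]
        by_cases hjb : b = j
        · subst hjb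
          simp [pvUpd]
        · simp only [List.getElem_map, List.getElem_range, if_neg hjb, pvUpd]
          rw [if_neg (by tauto)]
    · rw [if_neg hia]
      simp only [List.getElem_map, List.getElem_range, pvUpd]
      apply List.map_congr_left
      intro j _
      rw [if_neg (by tauto)]

theorem pvFold_grid (T n : Nat) (i j : Nat → Nat) (v : Nat → Int) :
    ∀ (ks : List Nat) (F : Nat → Nat → Int),
      (∀ k ∈ ks, i k < T ∧ j k < n) →
      ks.foldl (fun g k => g.modify (i k) (fun row => row.set (j k) (v k))) (pvGrid T n F)
        = pvGrid T n (ks.foldl (fun F k => pvUpd F (i k) (j k) (v k)) F)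
  | [], _, _ => rfl
  | k :: ks, F, h => by
      simp only [List.foldl_cons]
      rw [pvGrid_modify_set T n (i k) (j k) (v k) F (h k (by simp)).1 (h k (by simp)).2]
      exact pvFold_grid T n i j v ks _ (fun k hk => h k (by simp [hk]))

theorem pvDouble (n : Nat) (w : Nat → Nat → Int) (hn : 0 < n) :
    ∀ (rs : List Nat) (F : Nat → Nat → Int), (∀ r ∈ rs, r < n) →
      rs.foldl (fun g r =>
          (List.range n).foldl (fun g k => g.modify (r + k) (fun row => row.set r (w r k))) g)
        (pvGrid (2 * n - 1) n F)
        = pvGrid (2 * n - 1) n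
            (rs.foldl (fun F r =>
              (List.range n).foldl (fun F k => pvUpd F (r + k) r (w r k)) F) F)
  | [], _, _ => rfl
  | r :: rs, F, h => by
      simp only [List.foldl_cons]
      rw [pvFold_grid (2 * n - 1) n (fun k => r + k) (fun _ => r) (w r) (List.range n) F
        (fun k hk => by
          have hr := h r (by simp)
          have hk' := List.mem_range.mp hk
          refine ⟨?_, hr⟩
          show r + k < 2 * n - 1
          omega)]
      exact pvDouble n w hn rs _ (fun r' hr' => h r' (by simp [hr']))

theorem pvInnerEval (r : Nat) (w : Nat → Int) :
    ∀ (m : Nat) (F : Nat → Nat → Int) (c col : Nat),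
      ((List.range m).foldl (fun F k => pvUpd F (r + k) r (w k)) F) c col
        = if col = r ∧ r ≤ c ∧ c < r + m then w (c - r) else F c col := by
  intro m
  induction m with
  | zero =>
      intro F c col
      simp only [List.range_zero, List.foldl_nil]
      rw [if_neg (by omega)]
  | succ m ih =>
      intro F c col
      rw [List.range_succ, List.foldl_append]
      simp only [List.foldl_cons, List.foldl_nil]
      by_cases hc : c = r + m ∧ col = r
      · have hcr : c - r = m := by omega
        rw [pvUpd_apply, if_pos hc, if_pos (by omega), hcr]
      · rw [pvUpd_apply, if_neg (by tauto), ih]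
        split_ifs with h1 h2 h2
        · rfl
        · omega
        · exfalso; exact hc ⟨by omega, h2.1⟩
        · rfl

theorem pvOuterEval (n : Nat) (w : Nat → Nat → Int) :
    ∀ (m : Nat) (F : Nat → Nat → Int) (c col : Nat),
      ((List.range m).foldl (fun F r =>
          (List.range n).foldl (fun F k => pvUpd F (r + k) r (w r k)) F) F) c col
        = if col < m ∧ col ≤ c ∧ c < col + n then w col (c - col) else F c col := by
  intro m
  induction m with
  | zero =>
      intro F c col
      simp only [List.range_zero, List.foldl_nil]
      rw [if_neg (by omega)]
  | succ m ih =>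
      intro F c col
      rw [List.range_succ, List.foldl_append]
      simp only [List.foldl_cons, List.foldl_nil]
      rw [pvInnerEval, ih]
      by_cases hcol : col = m
      · subst hcol
        split_ifs with h1 h2 h2 <;> first | rfl | omega
      · split_ifs with h1 h2 h2 <;> first | rfl | omega

theorem stagger_eq_of_pos (M : List (List Int)) (direction : String) (DW : Int) (n : Nat)
    (hn : 0 < n) :
    stagger M direction (n : Int) DW = stagger_alt M direction (n : Int) DW := by
  have h2n : (2 * (n : Int) - 1) = ((2 * n - 1 : Nat) : Int) := by omega
  -- the scatter value function, per direction
  set w : Nat → Nat → Int :=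
    if direction == "row" then
      fun r k => PySem.List.pyGetD (PySem.List.pyGetD M (r : Int) []) (k : Int) 0
    else
      fun r k => PySem.List.pyGetD (PySem.List.pyGetD M (k : Int) []) (r : Int) 0
    with hw
  -- A's grid equals the functional description
  have hA : stagger M direction (n : Int) DW
      = (pvGrid (2 * n - 1) n
          ((List.range n).foldl (fun F r =>
            (List.range n).foldl (fun F k => pvUpd F (r + k) r (w r k)) F)
            (fun _ _ => 0))).flatten := by
    unfold stagger
    simp only [h2n, PySem.List.pyRange_zero_natCast, List.foldl_map]
    have hinit : List.map (fun _ => PySem.List.pyRepeat [(0 : Int)] (n : Int))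
        (List.map (fun k : Nat => (k : Int)) (List.range (2 * n - 1)))
        = pvGrid (2 * n - 1) n (fun _ _ => 0) := by
      simp [pvGrid, PySem.List.pyRepeat_singleton, List.map_const', List.map_map,
        Function.comp_def]
    have hcast : ∀ r k : Nat, ((r : Int) + (k : Int)).toNat = r + k := by
      intro r k; omega
    have htn : ∀ r : Nat, ((r : Int)).toNat = r := by intro r; omega
    by_cases hdir : direction == "row" <;>
    · simp only [hdir, if_true, if_false, Bool.false_eq_true, hinit, hcast, htn, hw]
      rw [pvDouble n _ hn (List.range n) _ (fun r hr => List.mem_range.mp hr)]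
      simp only [PySem.List.foldl_append_singleton_eq_self, PySem.List.foldl_append_eq_flatten,
        List.nil_append]
  rw [hA]
  unfold stagger_alt
  simp only [h2n, PySem.List.pyRange_zero_natCast, List.foldl_map]
  simp only [PySem.List.foldl_append_singleton_eq_map, PySem.List.foldl_append_eq_flatMap,
    List.nil_append]
  rw [List.flatMap_def]
  apply congrArg
  apply List.map_congr_left
  intro c hc
  apply List.map_congr_left
  intro col hcol
  have hc' := List.mem_range.mp hc
  have hcol' := List.mem_range.mp hcol
  rw [pvOuterEval]
  have hsub : ∀ (h : col ≤ c), ((c : Int) - (col : Int)) = ((c - col : Nat) : Int) := by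
    intro h; omega
  by_cases hdir : direction == "row" <;>
  · simp only [hw, hdir, if_true, if_false, Bool.false_eq_true]
    split_ifs with h1 h2 h2
    · rw [hsub h1.2.1]
    · omega
    · omega
    · rfl

-- ===== VERDICT (by name: the statement is the Claim_ definition above) =====
theorem stagger_spec : Claim_equal_stagger := by
  intro M direction N DW _ _
  unfold Spec_stagger
  by_cases hN : N ≤ 0
  · unfold stagger stagger_alt
    rw [PySem.List.pyRange_one_eq_nil (by omega : N ≤ 0),
        PySem.List.pyRange_one_eq_nil (by omega : 2 * N - 1 ≤ 0)]
    simp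
    omega
  · have ⟨n, hn⟩ : ∃ n : Nat, N = (n : Int) := ⟨N.toNat, by omega⟩
    subst hn
    exact stagger_eq_of_pos M direction DW n (by omega)
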